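-- pv_equiv track=rewrite | github.com/IvanyutinSA/University | Semester 2/competitive_programing/tau-kita/main.py | restore_elements_order
-- ===== SOURCE A (Python) =====
-- def restore_elements_order(sentence: list):
--     final_sentence = list()
--     while sentence:
--         id = -(len(sentence)//2 + len(sentence) % 2)
--         final_sentence += [sentence.pop(id)]
--         if sentence:
--             final_sentence += [sentence.pop(id)]
--     return final_sentence
-- ===== SOURCE B (Python) =====
-- def restore_elements_order(sentence: list):
--     # Closed-form: A repeatedly pops the middle element; the result is simply
--     # the middle element followed by the left half (reversed) interleaved with
--     # the right half. One O(n) pass; no quadratic pops. Unlike A, the input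
--     # list is NOT emptied (return value is identical).
--     if not sentence:
--         return []
--     m = len(sentence) // 2
--     low = sentence[:m][::-1]
--     high = sentence[m + 1:]
--     out = [sentence[m]]
--     for x, y in zip(low, high):
--         out += [x, y]
--     k = min(len(low), len(high))
--     return out + low[k:] + high[k:]
-- ===== Notes on version B (the rewrite author's own statement) =====
-- stated objective: faster
-- what changed: Replaces the O(n^2) loop of repeated middle pops with a closed-form O(n) construction: the middle element followed by the reversed left half interleaved with the right half. B does not mutate/empty the input list (A does); return values are identical.
import Mathlib
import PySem

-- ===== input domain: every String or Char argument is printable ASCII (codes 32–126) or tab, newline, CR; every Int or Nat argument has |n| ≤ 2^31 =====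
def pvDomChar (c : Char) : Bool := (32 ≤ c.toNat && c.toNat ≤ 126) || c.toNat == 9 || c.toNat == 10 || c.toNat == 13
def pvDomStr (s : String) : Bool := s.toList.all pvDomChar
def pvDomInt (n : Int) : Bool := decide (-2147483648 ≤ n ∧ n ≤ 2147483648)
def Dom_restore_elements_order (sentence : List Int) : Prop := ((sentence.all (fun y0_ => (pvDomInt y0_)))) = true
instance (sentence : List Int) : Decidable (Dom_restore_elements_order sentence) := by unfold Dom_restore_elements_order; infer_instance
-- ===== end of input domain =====

-- B replaces A's quadratic loop of repeated middle pops with a one-pass closed-form construction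
-- (objective: faster); equivalence is about the RETURN value only — Python A empties the caller's
-- list in place, B leaves it untouched.

-- ===== PORT A =====
-- while sentence: id = -(len//2 + len%2); pop(id); if sentence: pop(id) again
def restoreLoopA : List Int → List Int → List Int
  | [], final => final
  | hd :: tl, final =>
    let n : Int := ((hd :: tl).length : Int)
    let idx : Int := -(PySem.Int.floordiv n 2 + PySem.Int.mod n 2)
    match h1 : PySem.List.pop? (hd :: tl) idx with
    | none => final          -- unreachable: idx is always in range for a nonempty list
    | some (x, s1) =>
      if s1 = [] then final ++ [x]
      else
        match h2 : PySem.List.pop? s1 idx with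
        | none => final ++ [x]   -- unreachable: idx is in range for s1 here
        | some (y, s2) => restoreLoopA s2 (final ++ [x, y])
  termination_by s _ => s.length
  decreasing_by
    have e1 := PySem.List.length_of_pop?_eq_some _ h1
    have e2 := PySem.List.length_of_pop?_eq_some _ h2
    simp only [List.length_cons] at e1 e2 ⊢; omega

def restore_elements_order (sentence : List Int) : List Int :=
  restoreLoopA sentence []

-- ===== PORT B =====
def restore_elements_order_alt (sentence : List Int) : List Int :=
  if sentence = [] then []
  else
    let m := sentence.length / 2            -- len(sentence) // 2 (length is nonnegative)
    let low := (sentence.take m).reverse    -- sentence[:m][::-1] (nonneg in-range slice = take)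
    let high := sentence.drop (m + 1)       -- sentence[m+1:]
    let out := [sentence.getD m 0]          -- sentence[m], in range since m < len
    let out := (low.zip high).foldl (fun acc p => acc ++ [p.1, p.2]) out
    let k := min low.length high.length
    out ++ low.drop k ++ high.drop k

-- ===== PRECONDITION & SPEC =====
def Spec_restore_elements_order (sentence : List Int) (out : List Int) : Prop := out = restore_elements_order_alt sentence
instance (sentence : List Int) (out : List Int) : Decidable (Spec_restore_elements_order sentence out) := by unfold Spec_restore_elements_order; infer_instance

-- ===== CLAIM (what is proved, stated in full; the proofs are below) =====
def Claim_equal_restore_elements_order : Prop := ∀ (sentence : List Int), Dom_restore_elements_order sentence → Spec_restore_elements_order sentence (restore_elements_order sentence)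

-- ===== LEMMAS AND PROOFS =====

-- pop? at a negative in-range index -k pops position length - k
theorem pop?_neg_int (xs : List Int) (k : Nat) (h1 : 0 < k) (h2 : k ≤ xs.length) :
    PySem.List.pop? xs (-(k : Int)) =
      some (xs.getD (xs.length - k) 0, xs.eraseIdx (xs.length - k)) := by
  simp only [PySem.List.pop?, PySem.List.pyIdx?]
  rw [if_neg (by omega), if_pos (by omega)]
  have h3 : xs.length - k < xs.length := by omega
  simp [List.getD_eq_getElem?_getD, List.getElem?_eq_getElem h3]

-- A's per-iteration index -(L//2 + L%2), pushed to Nat arithmetic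
theorem idx_eq (L : Nat) :
    -(PySem.Int.floordiv (L : Int) 2 + PySem.Int.mod (L : Int) 2) = -((L / 2 + L % 2 : Nat) : Int) := by
  rw [PySem.Int.floordiv_eq_ediv_of_pos (by omega), PySem.Int.mod_eq_emod_of_pos (by omega)]
  push_cast; omega

-- erasing index m then m-1 removes the two middle elements
theorem eraseIdx_mid (s : List Int) (m : Nat) (hm : 1 ≤ m) (hmL : m < s.length) :
    (s.eraseIdx m).eraseIdx (m - 1) = s.take (m - 1) ++ s.drop (m + 1) := by
  rw [List.eraseIdx_eq_take_drop_succ s m,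
      List.eraseIdx_append_of_lt_length (by simp; omega),
      List.eraseIdx_eq_take_drop_succ, List.take_take, List.drop_take]
  have h1 : min (m - 1) m = m - 1 := by omega
  have h2 : m - (m - 1 + 1) = 0 := by omega
  rw [h1, h2]
  simp

theorem getD_mid (s : List Int) (m : Nat) (hm : 1 ≤ m) (hmL : m < s.length) :
    (s.eraseIdx m).getD (m - 1) 0 = s.getD (m - 1) 0 := by
  rw [List.eraseIdx_eq_take_drop_succ, List.getD_append _ _ _ _ (by simp; omega)]
  simp only [List.getD_eq_getElem?_getD, List.getElem?_take]
  rw [if_pos (by omega)]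

-- one full iteration (two pops) of A's while loop, for a list of length ≥ 2
theorem loopA_step (s acc : List Int) (h : 2 ≤ s.length) :
    restoreLoopA s acc =
      restoreLoopA ((s.take (s.length / 2 - 1)) ++ s.drop (s.length / 2 + 1))
        (acc ++ [s.getD (s.length / 2) 0, s.getD (s.length / 2 - 1) 0]) := by
  obtain ⟨hd, tl, rfl⟩ : ∃ a b, s = a :: b := by
    cases s with | nil => simp at h | cons a b => exact ⟨a, b, rfl⟩
  have hidx1 : (hd::tl).length - ((hd::tl).length / 2 + (hd::tl).length % 2)
      = (hd::tl).length / 2 := by omega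
  have hp1 := pop?_neg_int (hd::tl) ((hd::tl).length / 2 + (hd::tl).length % 2)
      (by omega) (by omega)
  rw [hidx1] at hp1
  have hs1len : ((hd::tl).eraseIdx ((hd::tl).length / 2)).length = (hd::tl).length - 1 := by
    rw [List.length_eraseIdx, if_pos (by omega)]
  have hs1ne : (hd::tl).eraseIdx ((hd::tl).length / 2) ≠ [] := by
    exact List.ne_nil_of_length_pos (by rw [hs1len]; omega)
  have hp2 := pop?_neg_int ((hd::tl).eraseIdx ((hd::tl).length / 2))
      ((hd::tl).length / 2 + (hd::tl).length % 2) (by omega) (by rw [hs1len]; omega)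
  rw [hs1len] at hp2
  have hidx2 : (hd::tl).length - 1 - ((hd::tl).length / 2 + (hd::tl).length % 2)
      = (hd::tl).length / 2 - 1 := by omega
  rw [hidx2] at hp2
  rw [getD_mid _ _ (by omega) (by omega), eraseIdx_mid _ _ (by omega) (by omega)] at hp2
  rw [restoreLoopA]
  simp only [List.length_cons] at *
  rw [idx_eq, hp1]
  simp only [hs1ne, ite_false]
  split
  next h2 => rw [hp2] at h2; cases h2
  next y s2 h2 =>
    rw [hp2] at h2
    simp only [Option.some.injEq, Prod.mk.injEq] at h2
    obtain ⟨h4, h5⟩ := h2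
    subst h4; subst h5
    rfl

-- B's closed form satisfies the same two-element recurrence
theorem alt_step (s : List Int) (h : 2 ≤ s.length) :
    restore_elements_order_alt s =
      s.getD (s.length / 2) 0 :: s.getD (s.length / 2 - 1) 0 ::
        restore_elements_order_alt ((s.take (s.length / 2 - 1)) ++ s.drop (s.length / 2 + 1)) := by
  have hne : s ≠ [] := by intro hnil; rw [hnil] at h; simp at h
  by_cases h2 : s.length = 2
  · obtain ⟨a, b, rfl⟩ : ∃ a b, s = [a, b] := by
      match s, h2 with
      | [a, b], _ => exact ⟨a, b, rfl⟩
    simp [restore_elements_order_alt]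
  · have h3 : 3 ≤ s.length := by omega
    have hm1 : 1 ≤ s.length / 2 := by omega
    have hmL : s.length / 2 + 1 < s.length := by omega
    have hlow : (s.take (s.length / 2)).reverse
        = s.getD (s.length / 2 - 1) 0 :: (s.take (s.length / 2 - 1)).reverse := by
      conv_lhs => rw [show s.length / 2 = (s.length / 2 - 1) + 1 by omega]
      rw [List.take_add_one, List.getElem?_eq_getElem (by omega)]
      simp [List.getD_eq_getElem?_getD, List.getElem?_eq_getElem (show s.length / 2 - 1 < s.length by omega)]
    have hhigh : s.drop (s.length / 2 + 1)
        = s.getD (s.length / 2 + 1) 0 :: s.drop (s.length / 2 + 2) := by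
      rw [List.drop_eq_getElem_cons hmL]
      simp [List.getD_eq_getElem?_getD, List.getElem?_eq_getElem hmL]
    have hrne : s.take (s.length / 2 - 1) ++ s.drop (s.length / 2 + 1) ≠ [] := by
      rw [hhigh]; simp
    have htklen : (s.take (s.length / 2 - 1)).length = s.length / 2 - 1 := by simp; omega
    have hrlen : (s.take (s.length / 2 - 1) ++ s.drop (s.length / 2 + 1)).length = s.length - 2 := by
      simp; omega
    have hrm : (s.take (s.length / 2 - 1) ++ s.drop (s.length / 2 + 1)).length / 2
        = s.length / 2 - 1 := by rw [hrlen]; omega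
    have hrget : (s.take (s.length / 2 - 1) ++ s.drop (s.length / 2 + 1)).getD (s.length / 2 - 1) 0
        = s.getD (s.length / 2 + 1) 0 := by
      rw [List.getD_append_right _ _ _ _ (by rw [htklen])]
      rw [htklen, Nat.sub_self, hhigh]
      simp
    have hrtake : (s.take (s.length / 2 - 1) ++ s.drop (s.length / 2 + 1)).take (s.length / 2 - 1)
        = s.take (s.length / 2 - 1) := by
      exact List.take_left' htklen
    have hrdrop : (s.take (s.length / 2 - 1) ++ s.drop (s.length / 2 + 1)).drop (s.length / 2)
        = s.drop (s.length / 2 + 2) := by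
      rw [List.drop_append, List.drop_eq_nil_of_le (by rw [htklen]; omega), htklen,
          show s.length / 2 - (s.length / 2 - 1) = 1 by omega, List.drop_drop]
      simp [show s.length / 2 + 1 + 1 = s.length / 2 + 2 by omega]
    simp only [restore_elements_order_alt, if_neg hne, if_neg hrne]
    rw [hrm, hrtake, hrget]
    rw [show s.length / 2 - 1 + 1 = s.length / 2 by omega]
    rw [hrdrop, hlow, hhigh]
    simp only [List.zip_cons_cons, List.foldl_cons, PySem.List.foldl_append_eq_flatMap,
      List.length_cons, List.length_reverse, List.length_drop, htklen]
    rw [show min (s.length / 2 - 1 + 1) (s.length - (s.length / 2 + 2) + 1)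
        = min (s.length / 2 - 1) (s.length - (s.length / 2 + 2)) + 1 by omega]
    simp [List.drop_succ_cons]

theorem loopA_eq_alt (s acc : List Int) : restoreLoopA s acc = acc ++ restore_elements_order_alt s := by
  induction hn : s.length using Nat.strong_induction_on generalizing s acc with
  | _ n IH =>
    subst hn
    by_cases h0 : s = []
    · subst h0; simp [restoreLoopA, restore_elements_order_alt]
    by_cases h1 : s.length = 1
    · obtain ⟨a, rfl⟩ : ∃ a, s = [a] := List.length_eq_one_iff.mp h1
      rw [restoreLoopA, idx_eq]
      have hp : PySem.List.pop? [a] (-(([a].length / 2 + [a].length % 2 : Nat) : Int))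
          = some (a, []) := by
        norm_num [PySem.List.pop?, PySem.List.pyIdx?]
      split
      next h2 => rw [hp] at h2; cases h2
      next x s1 h2 =>
        rw [hp] at h2
        simp only [Option.some.injEq, Prod.mk.injEq] at h2
        obtain ⟨h4, h5⟩ := h2
        subst h4; subst h5
        simp [restore_elements_order_alt]
    · have h2 : 2 ≤ s.length := by
        have := List.length_pos_of_ne_nil h0; omega
      have hrlen : ((s.take (s.length / 2 - 1)) ++ s.drop (s.length / 2 + 1)).length
          = s.length - 2 := by simp; omega
      rw [loopA_step s acc h2, alt_step s h2,
        IH (s.length - 2) (by omega) _ _ hrlen]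
      simp

-- ===== VERDICT (by name: the statement is the Claim_ definition above) =====
theorem restore_elements_order_spec : Claim_equal_restore_elements_order := by
  intro s _
  unfold Spec_restore_elements_order restore_elements_order
  simpa using loopA_eq_alt s []
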